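-- pv_equiv track=rewrite | github.com/luboolu/Programmers | WeeklyChallenge/1주차_부족한금액계산하기/solution.py | solution
-- ===== SOURCE A (Python) =====
-- def solution(price, money, count):
--     cost = 0
--
--     for c in range(count):
--         cost += (c + 1) * price
--
--     if cost > money:
--         return cost - money
--     else:
--         return 0
-- ===== SOURCE B (Python) =====
-- def solution(price, money, count):
--     n = count if count > 0 else 0
--     shortfall = price * n * (n + 1) // 2 - money
--     return shortfall if shortfall > 0 else 0
-- ===== Notes on version B (the rewrite author's own statement) =====
-- stated objective: faster
-- what changed: Replaces the O(count) accumulation loop with the arithmetic-series closed form price*n*(n+1)//2 and a max-with-zero.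
import Mathlib
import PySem

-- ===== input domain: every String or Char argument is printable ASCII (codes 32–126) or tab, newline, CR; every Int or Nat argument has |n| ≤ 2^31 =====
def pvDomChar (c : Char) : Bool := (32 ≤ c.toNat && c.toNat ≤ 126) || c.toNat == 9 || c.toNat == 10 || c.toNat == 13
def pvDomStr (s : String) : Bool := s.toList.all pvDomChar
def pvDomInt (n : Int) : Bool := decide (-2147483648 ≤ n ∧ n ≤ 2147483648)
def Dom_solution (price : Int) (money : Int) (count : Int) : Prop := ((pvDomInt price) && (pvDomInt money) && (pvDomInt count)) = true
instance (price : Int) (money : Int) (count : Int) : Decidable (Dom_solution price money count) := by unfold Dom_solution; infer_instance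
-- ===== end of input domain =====

-- B replaces A's O(count) accumulation loop with the O(1) arithmetic-series closed form.


-- ===== PORT A =====
def solution (price : Int) (money : Int) (count : Int) : Int :=
  let cost := (PySem.List.pyRange 0 count 1).foldl (fun cost c => cost + (c + 1) * price) 0
  if cost > money then cost - money else 0

-- ===== PORT B =====
def solution_alt (price : Int) (money : Int) (count : Int) : Int :=
  let n := if count > 0 then count else 0
  let shortfall := PySem.Int.floordiv (price * n * (n + 1)) 2 - money
  if shortfall > 0 then shortfall else 0

-- ===== PRECONDITION & SPEC =====
def Spec_solution (price : Int) (money : Int) (count : Int) (out : Int) : Prop := out = solution_alt price money count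
instance (price : Int) (money : Int) (count : Int) (out : Int) : Decidable (Spec_solution price money count out) := by unfold Spec_solution; infer_instance

-- ===== CLAIM (what is proved, stated in full; the proofs are below) =====
def Claim_equal_solution : Prop := ∀ (price : Int) (money : Int) (count : Int), Dom_solution price money count → Spec_solution price money count (solution price money count)

-- ===== LEMMAS AND PROOFS =====

/-- A's loop over `range(count)` doubles to the closed form `price * n * (n+1)`. -/
lemma cost_loop_double (price : Int) (n : Nat) :
    2 * (PySem.List.pyRange 0 (n : Int) 1).foldl (fun cost c => cost + (c + 1) * price) 0
      = price * (n : Int) * ((n : Int) + 1) := by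
  induction n with
  | zero => simp [PySem.List.pyRange_one_eq_nil]
  | succ k ih =>
      have h : PySem.List.pyRange 0 ((k : Int) + 1) 1
          = PySem.List.pyRange 0 (k : Int) 1 ++ [(k : Int)] :=
        PySem.List.pyRange_one_succ_right (by positivity)
      push_cast
      rw [h, List.foldl_append]
      simp only [List.foldl]
      ring_nf
      ring_nf at ih
      omega

lemma cost_eq_closed (price : Int) (count : Int) :
    (PySem.List.pyRange 0 count 1).foldl (fun cost c => cost + (c + 1) * price) 0
      = PySem.Int.floordiv (price * (if count > 0 then count else 0) * ((if count > 0 then count else 0) + 1)) 2 := by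
  rw [PySem.Int.floordiv_eq_ediv_of_pos (by norm_num)]
  split_ifs with h
  · obtain ⟨n, rfl⟩ : ∃ n : Nat, count = (n : Int) := ⟨count.toNat, (Int.toNat_of_nonneg (by omega)).symm⟩
    rw [← cost_loop_double price n, Int.mul_ediv_cancel_left _ (by norm_num)]
  · rw [PySem.List.pyRange_one_eq_nil (by omega)]
    simp

-- ===== VERDICT (by name: the statement is the Claim_ definition above) =====
theorem solution_spec : Claim_equal_solution := by
  intro price money count _
  unfold Spec_solution
  simp only [solution, solution_alt]
  rw [cost_eq_closed]
  split_ifs <;> omega
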